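-- pv_equiv track=rewrite | github.com/MohanKiranKotyada/HackerRank | Greedy/Goodland Electricity.py | pylons
-- ===== SOURCE A (Python) =====
-- def pylons(k, arr):
--     n = len(arr)
--     i = 0
--     count = 0
--     while i < n:
--         j = min(i + k - 1, n - 1)
--         found_plant = False  # Flag to check if a suitable city is found within the coverage range
--         while j >= max(0, i - k + 1):
--             if arr[j] == 1:
--                 count += 1
--                 i = j + k
--                 found_plant = True
--                 break
--             j -= 1
--         # If no suitable city found within the coverage range, return -1
--         if not found_plant:
--             return -1
--
--     return count
-- ===== SOURCE B (Python) =====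
-- def pylons(k, arr):
--     n = len(arr)
--     # prev[p] = largest index <= p with arr[index] == 1, else -1 (one forward pass)
--     prev = []
--     last = -1
--     for idx, v in enumerate(arr):
--         if v == 1:
--             last = idx
--         prev.append(last)
--     i = 0
--     count = 0
--     while i < n:
--         p = min(i + k - 1, n - 1)
--         if p < 0:
--             return -1
--         c = prev[p]
--         if c < 0 or c < i - k + 1:
--             return -1
--         count += 1
--         i = c + k
--     return count
-- ===== Notes on version B (the rewrite author's own statement) =====
-- stated objective: faster
-- what changed: Replaces A's inner backward scan over each coverage window with a prev[] table (largest plant index <= p) precomputed in one forward pass, making each greedy step O(1).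
import Mathlib
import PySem

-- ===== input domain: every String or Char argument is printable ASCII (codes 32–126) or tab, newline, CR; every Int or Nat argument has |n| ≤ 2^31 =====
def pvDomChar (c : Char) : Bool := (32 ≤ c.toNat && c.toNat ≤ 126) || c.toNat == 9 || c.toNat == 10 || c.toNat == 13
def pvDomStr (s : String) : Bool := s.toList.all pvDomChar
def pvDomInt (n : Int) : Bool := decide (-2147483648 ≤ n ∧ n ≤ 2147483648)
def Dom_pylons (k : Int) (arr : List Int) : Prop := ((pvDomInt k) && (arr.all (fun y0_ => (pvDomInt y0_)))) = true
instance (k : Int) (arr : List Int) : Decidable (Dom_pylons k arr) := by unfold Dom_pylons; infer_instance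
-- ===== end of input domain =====

-- B replaces A's inner backward scan of each coverage window by a prev[] table
-- (largest plant index ≤ p) built in one forward pass: each greedy step becomes O(1).

-- ===== PORT A =====
-- inner 'while j >= max(0, i-k+1)' scan of A; fuel is the number of remaining j values
def pylonsInnerA (arr : List Int) (low : Int) : Nat → Int → Option Int
  | 0, _ => none
  | fuel + 1, j =>
    if low ≤ j then
      if PySem.List.pyGet? arr j = some 1 then some j
      else pylonsInnerA arr low fuel (j - 1)
    else none

-- outer 'while i < n' loop of A; i strictly increases each iteration, so fuel n+1 suffices
def pylonsOuterA (k : Int) (arr : List Int) (n : Int) : Nat → Int → Int → Int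
  | 0, _, count => count
  | fuel + 1, i, count =>
    if i < n then
      let j := min (i + k - 1) (n - 1)
      let low := max 0 (i - k + 1)
      match pylonsInnerA arr low (j - low + 1).toNat j with
      | some jf => pylonsOuterA k arr n fuel (jf + k) (count + 1)
      | none => -1
    else count

def pylons (k : Int) (arr : List Int) : Int :=
  let n : Int := arr.length
  pylonsOuterA k arr n (arr.length + 1) 0 0

-- ===== PORT B =====
-- forward pass building prev (enumerate loop of Source B); idx is the enumerate index
def pylonsPrevF : List Int → Int → Nat → List Int
  | [], _, _ => []
  | v :: t, last, idx =>
    let last' := if v = 1 then (idx : Int) else last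
    last' :: pylonsPrevF t last' (idx + 1)

-- 'while i < n' loop of Source B; same fuel bound as A's outer loop
def pylonsOuterB (k n : Int) (prev : List Int) : Nat → Int → Int → Int
  | 0, _, count => count
  | fuel + 1, i, count =>
    if i < n then
      let p := min (i + k - 1) (n - 1)
      if p < 0 then -1
      else
        let c := (PySem.List.pyGet? prev p).getD (-1)
        if c < 0 ∨ c < i - k + 1 then -1
        else pylonsOuterB k n prev fuel (c + k) (count + 1)
    else count

def pylons_alt (k : Int) (arr : List Int) : Int :=
  let n : Int := arr.length
  let prev := pylonsPrevF arr (-1) 0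
  pylonsOuterB k n prev (arr.length + 1) 0 0

-- ===== PRECONDITION & SPEC =====
def Spec_pylons (k : Int) (arr : List Int) (out : Int) : Prop := out = pylons_alt k arr
instance (k : Int) (arr : List Int) (out : Int) : Decidable (Spec_pylons k arr out) := by unfold Spec_pylons; infer_instance

-- ===== CLAIM (what is proved, stated in full; the proofs are below) =====
def Claim_equal_pylons : Prop := ∀ (k : Int) (arr : List Int), Dom_pylons k arr → Spec_pylons k arr (pylons k arr)

-- ===== LEMMAS AND PROOFS =====

-- mathematical spec: largest index ≤ p with arr[index] = 1, else -1
def lastOneN (arr : List Int) : Nat → Int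
  | 0 => if arr[0]? = some 1 then 0 else -1
  | p + 1 => if arr[p + 1]? = some 1 then (p : Int) + 1 else lastOneN arr p

theorem lastOneN_le (arr : List Int) (p : Nat) : lastOneN arr p ≤ p := by
  induction p with
  | zero => simp [lastOneN]; split <;> omega
  | succ p ih => simp only [lastOneN]; split <;> omega

theorem pylonsPrevF_get (arr : List Int) : ∀ (t : List Int) (idx : Nat) (last : Int),
    t = arr.drop idx →
    last = (if idx = 0 then -1 else lastOneN arr (idx - 1)) →
    ∀ p : Nat, p < t.length → (pylonsPrevF t last idx)[p]? = some (lastOneN arr (idx + p)) := by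
  intro t
  induction t with
  | nil => intro idx last _ _ p hp; simp at hp
  | cons v t ih =>
    intro idx last ht hlast p hp
    have hvt : arr[idx]? = some v := by
      have h0 : (arr.drop idx)[0]? = some v := by rw [← ht]; rfl
      rw [List.getElem?_drop] at h0; simpa using h0
    have hlast' : (if v = 1 then (idx : Int) else last) = lastOneN arr idx := by
      cases idx with
      | zero =>
        have hl : last = -1 := by simpa using hlast
        by_cases hv : v = 1
        · simp [lastOneN, hvt, hv]
        · simp [lastOneN, hvt, hv, hl]
      | succ m =>
        have hl : last = lastOneN arr m := by simpa using hlast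
        by_cases hv : v = 1
        · simp [lastOneN, hvt, hv]
        · simp [lastOneN, hvt, hv, hl]
    cases p with
    | zero =>
      simp only [pylonsPrevF, List.getElem?_cons_zero, Nat.add_zero]
      exact congrArg some hlast'
    | succ p =>
      simp only [pylonsPrevF, List.getElem?_cons_succ]
      have ht' : t = arr.drop (idx + 1) := by
        have := congrArg (List.drop 1) ht
        simpa [List.drop_drop, Nat.add_comm] using this
      have := ih (idx + 1) (if v = 1 then (idx : Int) else last) ht'
        (by simp [hlast']) p (by simpa using hp)
      rw [this]
      congr 2
      omega

theorem pylonsPrevF_get_top (arr : List Int) (p : Nat) (hp : p < arr.length) :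
    (pylonsPrevF arr (-1) 0)[p]? = some (lastOneN arr p) := by
  have := pylonsPrevF_get arr arr 0 (-1) (by simp) (by simp) p (by simpa using hp)
  simpa using this

theorem pylonsInnerA_none_of_lt (arr : List Int) (low : Int) (fuel : Nat) (j : Int)
    (h : j < low) : pylonsInnerA arr low fuel j = none := by
  cases fuel with
  | zero => rfl
  | succ fuel => simp [pylonsInnerA, not_le.mpr h]

theorem pylonsInnerA_eq (arr : List Int) (low : Int) (hlow : 0 ≤ low) :
    ∀ (fuel : Nat) (j : Int), 0 ≤ j → j < (arr.length : Int) →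
    (j - low + 1).toNat ≤ fuel →
    pylonsInnerA arr low fuel j =
      (if low ≤ lastOneN arr j.toNat then some (lastOneN arr j.toNat) else none) := by
  intro fuel
  induction fuel with
  | zero =>
    intro j hj0 hjn hfuel
    have hjlow : j < low := by omega
    have hle : lastOneN arr j.toNat ≤ (j.toNat : Int) := lastOneN_le arr j.toNat
    have : ¬ low ≤ lastOneN arr j.toNat := by omega
    simp [pylonsInnerA, this]
  | succ fuel ih =>
    intro j hj0 hjn hfuel
    by_cases hlj : low ≤ j
    · have hget : PySem.List.pyGet? arr j = arr[j.toNat]? :=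
        PySem.List.pyGet?_of_nonneg arr hj0
      have hlt : j.toNat < arr.length := by omega
      by_cases hone : arr[j.toNat]? = some 1
      · have hlast : lastOneN arr j.toNat = j := by
          cases hjt : j.toNat with
          | zero => rw [hjt] at hone; simp [lastOneN, hone]; omega
          | succ m => rw [hjt] at hone; simp [lastOneN, hone]; omega
        simp [pylonsInnerA, hlj, hget, hone, hlast]
      · have hstep : pylonsInnerA arr low (fuel + 1) j = pylonsInnerA arr low fuel (j - 1) := by
          simp [pylonsInnerA, hlj, hget, hone]
        rw [hstep]
        by_cases hj0' : j = 0
        · subst hj0'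
          have hlow0 : low = 0 := by omega
          have hone0 : ¬ arr[0]? = some 1 := by simpa using hone
          have hl0 : lastOneN arr (Int.toNat 0) = -1 := by
            simp [lastOneN, hone0]
          rw [pylonsInnerA_none_of_lt arr low fuel (0 - 1) (by omega), hl0]
          simp [hlow0]
        · have hrec := ih (j - 1) (by omega) (by omega) (by omega)
          rw [hrec]
          have hjt : j.toNat = (j - 1).toNat + 1 := by omega
          have hone' : ¬ arr[(j - 1).toNat + 1]? = some 1 := by rw [← hjt]; exact hone
          have : lastOneN arr j.toNat = lastOneN arr (j - 1).toNat := by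
            rw [hjt]; simp only [lastOneN]; rw [if_neg hone']
          rw [this]
    · rw [pylonsInnerA_none_of_lt arr low fuel.succ j (by omega)]
      have hle : lastOneN arr j.toNat ≤ (j.toNat : Int) := lastOneN_le arr j.toNat
      have : ¬ low ≤ lastOneN arr j.toNat := by omega
      simp [this]

theorem pylonsOuter_eq (k : Int) (arr : List Int) :
    ∀ (fuel : Nat) (i count : Int),
    pylonsOuterA k arr (arr.length : Int) fuel i count =
      pylonsOuterB k (arr.length : Int) (pylonsPrevF arr (-1) 0) fuel i count := by
  intro fuel
  induction fuel with
  | zero => intro i count; rfl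
  | succ fuel ih =>
    intro i count
    by_cases hi : i < (arr.length : Int)
    · simp only [pylonsOuterA, pylonsOuterB, if_pos hi]
      set p := min (i + k - 1) ((arr.length : Int) - 1) with hp
      set low := max 0 (i - k + 1) with hlowdef
      have hlow0 : 0 ≤ low := by omega
      have hple : p ≤ (arr.length : Int) - 1 := by omega
      by_cases hpneg : p < 0
      · have hz : (p - low + 1).toNat = 0 := by omega
        rw [hz, if_pos hpneg]
        rfl
      · rw [if_neg hpneg]
        have hp0 : 0 ≤ p := by omega
        have hplt : p < (arr.length : Int) := by omega
        have hprevget : PySem.List.pyGet? (pylonsPrevF arr (-1) 0) p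
            = some (lastOneN arr p.toNat) := by
          rw [PySem.List.pyGet?_of_nonneg _ hp0]
          exact pylonsPrevF_get_top arr p.toNat (by omega)
        have hinner := pylonsInnerA_eq arr low hlow0 (p - low + 1).toNat p hp0
          hplt (le_refl _)
        set c := lastOneN arr p.toNat with hc
        have hcle : c ≤ (p.toNat : Int) := lastOneN_le arr p.toNat
        by_cases hcond : low ≤ c
        · have hnot : ¬ (c < 0 ∨ c < i - k + 1) := by omega
          rw [hinner, hprevget]
          simp only [if_pos hcond, Option.getD_some, if_neg hnot]
          exact ih (c + k) (count + 1)
        · have hor : c < 0 ∨ c < i - k + 1 := by omega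
          rw [hinner, hprevget]
          simp only [if_neg hcond, Option.getD_some, if_pos hor]
    · simp [pylonsOuterA, pylonsOuterB, hi]

-- ===== VERDICT (by name: the statement is the Claim_ definition above) =====
theorem pylons_spec : Claim_equal_pylons := by
  intro k arr _
  unfold Spec_pylons pylons pylons_alt
  exact pylonsOuter_eq k arr (arr.length + 1) 0 0
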